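-- pv_equiv track=rewrite | github.com/jlescher/adventofcode | 2017/day_02_corruption_checksum/s.py | divider_checksum
-- ===== SOURCE A (Python) =====
-- def divider_checksum(spreadsheet):
--     cnt = 0
--     for l in spreadsheet:
--         for dividend in l:
--             for divisor in l:
--                 if dividend > divisor and dividend % divisor == 0:
--                     cnt += dividend // divisor
--     return cnt
-- ===== SOURCE B (Python) =====
-- def divider_checksum(spreadsheet):
--     total = 0
--     for row in spreadsheet:
--         c = {}
--         for x in row:
--             c[x] = c.get(x, 0) + 1
--         for v in c:
--             for d in c:
--                 if v > d and v % d == 0: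
--                     total += (v // d) * c[v] * c[d]
--     return total
-- ===== Notes on version B (the rewrite author's own statement) =====
-- stated objective: alternative
-- what changed: Replaces the all-ordered-pairs double scan over row positions by a frequency table built once per row and a double scan over DISTINCT values only, weighting each evenly-dividing pair (v,d) by c[v]*c[d].
import Mathlib
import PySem

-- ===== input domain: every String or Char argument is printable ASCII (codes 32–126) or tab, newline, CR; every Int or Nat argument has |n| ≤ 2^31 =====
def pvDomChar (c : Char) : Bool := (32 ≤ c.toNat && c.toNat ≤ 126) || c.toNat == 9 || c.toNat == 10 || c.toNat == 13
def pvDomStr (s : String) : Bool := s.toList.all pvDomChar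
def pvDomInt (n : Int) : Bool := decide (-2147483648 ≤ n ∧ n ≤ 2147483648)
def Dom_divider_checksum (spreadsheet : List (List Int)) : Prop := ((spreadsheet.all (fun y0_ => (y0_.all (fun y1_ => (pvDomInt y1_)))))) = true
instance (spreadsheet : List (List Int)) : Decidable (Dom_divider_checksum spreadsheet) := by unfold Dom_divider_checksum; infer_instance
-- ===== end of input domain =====

-- B replaces A's double scan over row positions by a per-row frequency table and a double scan
-- over distinct values, weighted by the count product (alternative algorithm, same results).

-- ===== PORT A =====
def divider_checksum (spreadsheet : List (List Int)) : Int :=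
  spreadsheet.foldl (fun cnt l =>
    l.foldl (fun cnt dividend =>
      l.foldl (fun cnt divisor =>
        if dividend > divisor ∧ PySem.Int.mod dividend divisor = 0
        then cnt + PySem.Int.floordiv dividend divisor else cnt) cnt) cnt) 0

-- ===== PORT B =====
def divider_checksum_alt (spreadsheet : List (List Int)) : Int :=
  spreadsheet.foldl (fun total row =>
    let c := row.foldl (fun (d : PySem.Dict Int Int) x => d.insert x (d.getD x 0 + 1)) PySem.Dict.empty
    c.keys.foldl (fun total v =>
      c.keys.foldl (fun total d =>
        if v > d ∧ PySem.Int.mod v d = 0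
        then total + PySem.Int.floordiv v d * c.getD v 0 * c.getD d 0 else total) total) total) 0

-- ===== PRECONDITION & SPEC =====
-- Pre_ excludes exactly the inputs on which the Python A raises ZeroDivisionError:
-- a row containing 0 together with some positive element (then dividend % 0 is evaluated).
def Pre_divider_checksum (spreadsheet : List (List Int)) : Prop :=
  ∀ l ∈ spreadsheet, (0 : Int) ∈ l → ∀ x ∈ l, x ≤ 0
instance (spreadsheet : List (List Int)) : Decidable (Pre_divider_checksum spreadsheet) := by
  unfold Pre_divider_checksum; infer_instance

def pvWitness_divider_checksum : List (List Int) := [[5, 9, 2, 8], [9, 4, 7, 3], [3, 8, 6, 5]]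

def Spec_divider_checksum (spreadsheet : List (List Int)) (out : Int) : Prop := out = divider_checksum_alt spreadsheet
instance (spreadsheet : List (List Int)) (out : Int) : Decidable (Spec_divider_checksum spreadsheet out) := by unfold Spec_divider_checksum; infer_instance

-- ===== CLAIM (what is proved, stated in full; the proofs are below) =====
def Claim_equal_divider_checksum : Prop := ∀ (spreadsheet : List (List Int)), Dom_divider_checksum spreadsheet → Pre_divider_checksum spreadsheet → Spec_divider_checksum spreadsheet (divider_checksum spreadsheet)

-- ===== LEMMAS AND PROOFS =====

-- the per-pair contribution both programs sum
def pvG (v d : Int) : Int :=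
  if v > d ∧ PySem.Int.mod v d = 0 then PySem.Int.floordiv v d else 0

theorem pv_foldl_ite_add (l : List Int) (P : Int → Prop) [DecidablePred P] (t : Int → Int) (a : Int) :
    l.foldl (fun acc y => if P y then acc + t y else acc) a
      = a + (l.map (fun y => if P y then t y else 0)).sum := by
  rw [PySem.List.foldl_congr_mem l _ (fun acc y => acc + (if P y then t y else 0)) a
      (by intro acc x _; by_cases h : P x <;> simp [h])]
  exact PySem.List.foldl_add l _ a

theorem pv_sum_indicator (h : Int → Int) (x : Int) :
    ∀ (L : List Int), L.Nodup → x ∈ L →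
      (L.map (fun v => (if v = x then (1 : Int) else 0) * h v)).sum = h x
  | [] => by simp
  | y :: ys => by
    intro hnd hmem
    rw [List.nodup_cons] at hnd
    simp only [List.map_cons, List.sum_cons]
    by_cases hyx : y = x
    · subst hyx
      have hz : (ys.map (fun v => if v = y then h v else 0)).sum = 0 := by
        apply List.sum_eq_zero
        intro z hz
        obtain ⟨v, hv, rfl⟩ := List.mem_map.mp hz
        have hvy : v ≠ y := fun e => hnd.1 (e ▸ hv)
        simp [hvy]
      simp [hz]
    · have hx' : x ∈ ys := by
        rcases List.mem_cons.mp hmem with e | h'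
        · exact absurd e.symm hyx
        · exact h'
      rw [pv_sum_indicator h x ys hnd.2 hx']
      simp [hyx]

theorem pv_sum_count (h : Int → Int) :
    ∀ (l L : List Int), L.Nodup → (∀ v ∈ l, v ∈ L) →
      (L.map (fun v => (l.count v : Int) * h v)).sum = (l.map h).sum := by
  intro l
  induction l with
  | nil => intro L _ _; simp
  | cons x xs ih =>
    intro L hnd hmem
    have hx : x ∈ L := hmem x (List.mem_cons_self)
    have hxs : ∀ v ∈ xs, v ∈ L := fun v hv => hmem v (List.mem_cons_of_mem _ hv)
    have hsplit : ∀ v : Int, ((x :: xs).count v : Int) * h v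
        = (xs.count v : Int) * h v + (if v = x then (1 : Int) else 0) * h v := by
      intro v
      by_cases hvx : v = x
      · subst hvx; simp [List.count_cons_self]; ring
      · have : (x == v) = false := by simp [Ne.symm hvx]
        simp [List.count_cons, this, hvx]
    calc (L.map (fun v => ((x :: xs).count v : Int) * h v)).sum
        = (L.map (fun v => (xs.count v : Int) * h v + (if v = x then (1 : Int) else 0) * h v)).sum := by
          exact congrArg List.sum (List.map_congr_left (fun v _ => hsplit v))
      _ = (L.map (fun v => (xs.count v : Int) * h v)).sum
            + (L.map (fun v => (if v = x then (1 : Int) else 0) * h v)).sum := by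
          rw [← List.sum_map_add]
      _ = (xs.map h).sum + h x := by rw [ih L hnd hxs, pv_sum_indicator h x L hnd hx]
      _ = ((x :: xs).map h).sum := by simp [add_comm]

theorem pv_row_eq (l L : List Int) (hnd : L.Nodup) (hmem : ∀ v ∈ l, v ∈ L) :
    (L.map (fun v => (L.map (fun d => (l.count v : Int) * ((l.count d : Int) * pvG v d))).sum)).sum
      = (l.map (fun x => (l.map (fun y => pvG x y)).sum)).sum := by
  calc (L.map (fun v => (L.map (fun d => (l.count v : Int) * ((l.count d : Int) * pvG v d))).sum)).sum
      = (L.map (fun v => (l.count v : Int) * (L.map (fun d => (l.count d : Int) * pvG v d)).sum)).sum := by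
        refine congrArg List.sum (List.map_congr_left (fun v _ => ?_))
        rw [← List.sum_map_mul_left]
    _ = (L.map (fun v => (l.count v : Int) * (l.map (fun y => pvG v y)).sum)).sum := by
        refine congrArg List.sum (List.map_congr_left (fun v _ => ?_))
        rw [pv_sum_count (fun d => pvG v d) l L hnd hmem]
    _ = (l.map (fun x => (l.map (fun y => pvG x y)).sum)).sum :=
        pv_sum_count (fun x => (l.map (fun y => pvG x y)).sum) l L hnd hmem

theorem pv_rowA (l : List Int) (a : Int) :
    l.foldl (fun cnt dividend =>
      l.foldl (fun cnt divisor =>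
        if dividend > divisor ∧ PySem.Int.mod dividend divisor = 0
        then cnt + PySem.Int.floordiv dividend divisor else cnt) cnt) a
      = a + (l.map (fun x => (l.map (fun y => pvG x y)).sum)).sum := by
  rw [PySem.List.foldl_congr_mem l _
      (fun cnt x => cnt + (l.map (fun y => pvG x y)).sum) a
      (by
        intro acc x _
        exact pv_foldl_ite_add l (fun y => x > y ∧ PySem.Int.mod x y = 0)
          (fun y => PySem.Int.floordiv x y) acc)]
  exact PySem.List.foldl_add l _ a

theorem pv_rowB (l : List Int) (a : Int) :
    (PySem.Set.ofList l).foldl (fun total v =>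
      (PySem.Set.ofList l).foldl (fun total d =>
        if v > d ∧ PySem.Int.mod v d = 0
        then total + PySem.Int.floordiv v d * (l.count v : Int) * (l.count d : Int) else total) total) a
      = a + ((PySem.Set.ofList l).map (fun v =>
          ((PySem.Set.ofList l).map (fun d => (l.count v : Int) * ((l.count d : Int) * pvG v d))).sum)).sum := by
  rw [PySem.List.foldl_congr_mem _ _
      (fun total v => total +
        ((PySem.Set.ofList l).map (fun d => (l.count v : Int) * ((l.count d : Int) * pvG v d))).sum) a
      (by
        intro acc v _
        rw [pv_foldl_ite_add (PySem.Set.ofList l) (fun d => v > d ∧ PySem.Int.mod v d = 0)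
          (fun d => PySem.Int.floordiv v d * (l.count v : Int) * (l.count d : Int)) acc]
        congr 1
        refine congrArg List.sum (List.map_congr_left (fun d _ => ?_))
        simp only [pvG]
        split <;> ring)]
  exact PySem.List.foldl_add _ _ a

theorem pv_step_eq (a : Int) (l : List Int) :
    l.foldl (fun cnt dividend =>
      l.foldl (fun cnt divisor =>
        if dividend > divisor ∧ PySem.Int.mod dividend divisor = 0
        then cnt + PySem.Int.floordiv dividend divisor else cnt) cnt) a
    = (let c := l.foldl (fun (d : PySem.Dict Int Int) x => d.insert x (d.getD x 0 + 1)) PySem.Dict.empty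
       c.keys.foldl (fun total v =>
         c.keys.foldl (fun total d =>
           if v > d ∧ PySem.Int.mod v d = 0
           then total + PySem.Int.floordiv v d * c.getD v 0 * c.getD d 0 else total) total) a) := by
  simp only [PySem.Dict.foldl_insert_getD_add_one_eq_counter, PySem.Dict.keys_counter,
    PySem.Dict.getD_counter]
  rw [pv_rowA l a, pv_rowB l a,
    pv_row_eq l (PySem.Set.ofList l) (PySem.Set.nodup_ofList l)
      (fun v hv => (PySem.Set.mem_ofList l v).mpr hv)]

theorem pv_main : ∀ (s : List (List Int)) (a : Int),
    s.foldl (fun cnt l =>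
      l.foldl (fun cnt dividend =>
        l.foldl (fun cnt divisor =>
          if dividend > divisor ∧ PySem.Int.mod dividend divisor = 0
          then cnt + PySem.Int.floordiv dividend divisor else cnt) cnt) cnt) a
    = s.foldl (fun total row =>
        let c := row.foldl (fun (d : PySem.Dict Int Int) x => d.insert x (d.getD x 0 + 1)) PySem.Dict.empty
        c.keys.foldl (fun total v =>
          c.keys.foldl (fun total d =>
            if v > d ∧ PySem.Int.mod v d = 0
            then total + PySem.Int.floordiv v d * c.getD v 0 * c.getD d 0 else total) total) total) a
  | [], a => rfl
  | l :: s, a => by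
    show List.foldl _ (l.foldl (fun cnt dividend =>
        l.foldl (fun cnt divisor =>
          if dividend > divisor ∧ PySem.Int.mod dividend divisor = 0
          then cnt + PySem.Int.floordiv dividend divisor else cnt) cnt) a) s
      = List.foldl _ ((let c := l.foldl (fun (d : PySem.Dict Int Int) x => d.insert x (d.getD x 0 + 1)) PySem.Dict.empty
          c.keys.foldl (fun total v =>
            c.keys.foldl (fun total d =>
              if v > d ∧ PySem.Int.mod v d = 0
              then total + PySem.Int.floordiv v d * c.getD v 0 * c.getD d 0 else total) total) a)) s
    rw [pv_step_eq a l]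
    exact pv_main s _

-- ===== VERDICT (by name: the statement is the Claim_ definition above) =====
theorem divider_checksum_spec : Claim_equal_divider_checksum := by
  intro spreadsheet _ _
  unfold Spec_divider_checksum divider_checksum divider_checksum_alt
  exact pv_main spreadsheet 0
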